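-- pv_equiv track=rewrite | github.com/sporebattyl/aicleaner_v3 | addons/aicleaner_v3/src/security_manager.py | _assess_secret_strength
-- ===== SOURCE A (Python) =====
-- def _assess_secret_strength(secret: str) -> int:
--     """Assess secret strength (0-100 score)"""
--     score = 0
--
--     # Length bonus
--     score += min(len(secret) * 2, 40)
--
--     # Character variety
--     has_upper = any(c.isupper() for c in secret)
--     has_lower = any(c.islower() for c in secret)
--     has_digit = any(c.isdigit() for c in secret)
--     has_special = any(not c.isalnum() for c in secret)
--
--     score += sum([has_upper, has_lower, has_digit, has_special]) * 15
--
--     # Entropy estimation (simple)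
--     unique_chars = len(set(secret))
--     score += min(unique_chars * 2, 20)
--
--     return min(score, 100)
-- ===== SOURCE B (Python) =====
-- def _assess_secret_strength(secret: str) -> int:
--     """Assess secret strength (0-100 score).
--
--     Different strategy: each character is mapped to one of four categories
--     (upper / lower / digit / other, which partition printable ASCII), and the
--     variety bonus is the number of distinct categories that occur; the number
--     of distinct characters is obtained by sorting the secret and counting
--     runs instead of building a hash set.
--     """
--     def category(c):
--         if c.isupper():
--             return 0
--         if c.islower():
--             return 1
--         if c.isdigit():
--             return 2
--         return 3
--
--     variety = len({category(c) for c in secret})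
--
--     unique = 0
--     prev = None
--     for c in sorted(secret):
--         if c != prev:
--             unique += 1
--             prev = c
--
--     score = min(len(secret) * 2, 40) + 15 * variety + min(2 * unique, 20)
--     return min(score, 100)
-- ===== Notes on version B (the rewrite author's own statement) =====
-- stated objective: alternative
-- what changed: Variety is computed as the size of a set of per-character category labels (upper/lower/digit/other partition printable ASCII) instead of four any() scans, and the distinct-character count is obtained by sorting the secret and counting runs instead of building a set of characters; the scoring arithmetic is unchanged.
import Mathlib
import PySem

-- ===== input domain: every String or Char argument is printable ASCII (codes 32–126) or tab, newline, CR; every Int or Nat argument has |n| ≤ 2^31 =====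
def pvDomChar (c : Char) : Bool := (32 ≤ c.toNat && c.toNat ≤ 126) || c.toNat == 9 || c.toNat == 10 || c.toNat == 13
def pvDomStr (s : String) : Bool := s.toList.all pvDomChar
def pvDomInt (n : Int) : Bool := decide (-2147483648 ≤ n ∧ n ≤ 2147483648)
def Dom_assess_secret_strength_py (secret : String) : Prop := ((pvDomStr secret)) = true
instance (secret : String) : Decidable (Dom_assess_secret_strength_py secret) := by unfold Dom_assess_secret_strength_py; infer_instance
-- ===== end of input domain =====

-- B computes the variety bonus as the size of a set of per-character category labels
-- (upper/lower/digit/other, partitioning ASCII) and the distinct-character count by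
-- sorting the secret and counting runs, instead of A's four any() scans and set(secret)
-- (alternative algorithm, same cost class).

-- ===== PORT A =====
def assess_secret_strength_py (secret : String) : Int :=
  let score : Int := 0
  let score := score + min (PySem.Str.len secret * 2) 40
  let has_upper := secret.toList.any PySem.Chars.isupper
  let has_lower := secret.toList.any PySem.Chars.islower
  let has_digit := secret.toList.any PySem.Chars.isdigit
  let has_special := secret.toList.any (fun c => !PySem.Chars.isalnum c)
  let score := score + ((if has_upper then (1:Int) else 0) + (if has_lower then (1:Int) else 0)
      + (if has_digit then (1:Int) else 0) + (if has_special then (1:Int) else 0)) * 15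
  let unique_chars : Int := PySem.Set.len (PySem.Set.ofList secret.toList)
  let score := score + min (unique_chars * 2) 20
  min score 100

-- ===== PORT B =====
-- category c: 0 = upper, 1 = lower, 2 = digit, 3 = other (partition of ASCII)
def pvCategory (c : Char) : Int :=
  if PySem.Chars.isupper c then 0
  else if PySem.Chars.islower c then 1
  else if PySem.Chars.isdigit c then 2
  else 3

def assess_secret_strength_py_alt (secret : String) : Int :=
  let variety : Int := PySem.Set.len (PySem.Set.ofList (secret.toList.map pvCategory))
  -- run-count of the sorted secret: state = (unique, prev)
  let st := (PySem.List.sorted secret.toList (fun c => c) false).foldl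
      (fun (st : Int × Option Char) c => if some c ≠ st.2 then (st.1 + 1, some c) else st)
      (0, none)
  let unique : Int := st.1
  min (min (PySem.Str.len secret * 2) 40 + 15 * variety + min (2 * unique) 20) 100

-- ===== PRECONDITION & SPEC =====
def Spec_assess_secret_strength_py (secret : String) (out : Int) : Prop := out = assess_secret_strength_py_alt secret
instance (secret : String) (out : Int) : Decidable (Spec_assess_secret_strength_py secret out) := by unfold Spec_assess_secret_strength_py; infer_instance

-- ===== CLAIM (what is proved, stated in full; the proofs are below) =====
def Claim_equal_assess_secret_strength_py : Prop := ∀ (secret : String), Dom_assess_secret_strength_py secret → Spec_assess_secret_strength_py secret (assess_secret_strength_py secret)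

-- ===== LEMMAS AND PROOFS =====

-- the four categories decode the four variety flags (for every Char, by the ASCII ranges)
theorem pvCategory_eq_zero (c : Char) : pvCategory c = 0 ↔ PySem.Chars.isupper c = true := by
  unfold pvCategory
  split_ifs <;> simp_all

theorem pv_upper_lower (c : Char) (h : PySem.Chars.isupper c = true) : PySem.Chars.islower c = false := by
  simp only [PySem.Chars.isupper, Bool.and_eq_true, decide_eq_true_eq] at h
  have hna : ¬ ('a' ≤ c) := fun hac => absurd (le_trans hac h.2) (by decide)
  simp [PySem.Chars.islower, hna]

theorem pv_upper_digit (c : Char) (h : PySem.Chars.isupper c = true) : PySem.Chars.isdigit c = false := by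
  simp only [PySem.Chars.isupper, Bool.and_eq_true, decide_eq_true_eq] at h
  have hn9 : ¬ (c ≤ '9') := fun h9 => absurd (le_trans h.1 h9) (by decide)
  simp [PySem.Chars.isdigit, hn9]

theorem pv_lower_digit (c : Char) (h : PySem.Chars.islower c = true) : PySem.Chars.isdigit c = false := by
  simp only [PySem.Chars.islower, Bool.and_eq_true, decide_eq_true_eq] at h
  have hn9 : ¬ (c ≤ '9') := fun h9 => absurd (le_trans h.1 h9) (by decide)
  simp [PySem.Chars.isdigit, hn9]

theorem pvCategory_eq_one (c : Char) : pvCategory c = 1 ↔ PySem.Chars.islower c = true := by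
  unfold pvCategory
  split_ifs with h1 h2 <;> simp_all [pv_upper_lower c]

theorem pvCategory_eq_two (c : Char) : pvCategory c = 2 ↔ PySem.Chars.isdigit c = true := by
  unfold pvCategory
  split_ifs with h1 h2 h3 <;> simp_all [pv_upper_digit c, pv_lower_digit c]

theorem pvCategory_eq_three (c : Char) : pvCategory c = 3 ↔ (!PySem.Chars.isalnum c) = true := by
  unfold pvCategory
  simp only [PySem.Chars.isalnum, PySem.Chars.isalpha]
  split_ifs <;> simp_all

theorem pvCategory_cases (c : Char) :
    pvCategory c = 0 ∨ pvCategory c = 1 ∨ pvCategory c = 2 ∨ pvCategory c = 3 := by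
  unfold pvCategory
  split_ifs <;> simp

-- Set.len of any Nodup "set" list equals the card of its toFinset
theorem pv_setlen_eq_card (cs : List Char) :
    PySem.Set.len (PySem.Set.ofList cs) = cs.toFinset.card := by
  have hnd := PySem.Set.nodup_ofList cs
  have : (PySem.Set.ofList cs).toFinset = cs.toFinset := by
    ext x
    simp [PySem.Set.mem_ofList]
  rw [PySem.Set.len, ← this, List.toFinset_card_of_nodup hnd]

-- VARIETY: the size of the category set equals A's sum of the four flags
theorem pv_variety (cs : List Char) :
    (PySem.Set.len (PySem.Set.ofList (cs.map pvCategory)) : Int)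
    = (if cs.any PySem.Chars.isupper then (1:Int) else 0)
      + (if cs.any PySem.Chars.islower then (1:Int) else 0)
      + (if cs.any PySem.Chars.isdigit then (1:Int) else 0)
      + (if cs.any (fun c => !PySem.Chars.isalnum c) then (1:Int) else 0) := by
  set S : List Int := PySem.Set.ofList (cs.map pvCategory) with hS
  have hnd : S.Nodup := by rw [hS]; exact PySem.Set.nodup_ofList _
  have hmem : ∀ k : Int, k ∈ S ↔ ∃ c ∈ cs, pvCategory c = k := by
    intro k
    simp [hS, PySem.Set.mem_ofList, List.mem_map, eq_comm]
  have hsub : ∀ k ∈ S, k = 0 ∨ k = 1 ∨ k = 2 ∨ k = 3 := by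
    intro k hk
    rcases (hmem k).1 hk with ⟨c, _, rfl⟩
    exact pvCategory_cases c
  have hfin : S.toFinset = ({0, 1, 2, 3} : Finset Int).filter (fun k => k ∈ S) := by
    ext k
    simp only [List.mem_toFinset, Finset.mem_filter, Finset.mem_insert, Finset.mem_singleton]
    exact ⟨fun hk => ⟨hsub k hk, hk⟩, fun hk => hk.2⟩
  have hlen : PySem.Set.len S = S.toFinset.card := by
    rw [PySem.Set.len, List.toFinset_card_of_nodup hnd]
  have hcard : S.toFinset.card
      = (if (0:Int) ∈ S then 1 else 0) + (if (1:Int) ∈ S then 1 else 0)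
        + (if (2:Int) ∈ S then 1 else 0) + (if (3:Int) ∈ S then 1 else 0) := by
    rw [hfin, Finset.card_filter]
    rw [show ({0, 1, 2, 3} : Finset Int) = insert 0 (insert 1 (insert 2 ({3} : Finset Int))) from rfl]
    rw [Finset.sum_insert (by decide), Finset.sum_insert (by decide),
        Finset.sum_insert (by decide), Finset.sum_singleton]
    ring
  have h0 : ((0:Int) ∈ S) ↔ cs.any PySem.Chars.isupper = true := by
    rw [hmem]; simp only [List.any_eq_true]
    exact ⟨fun ⟨c, hc, h⟩ => ⟨c, hc, (pvCategory_eq_zero c).1 h⟩,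
           fun ⟨c, hc, h⟩ => ⟨c, hc, (pvCategory_eq_zero c).2 h⟩⟩
  have h1 : ((1:Int) ∈ S) ↔ cs.any PySem.Chars.islower = true := by
    rw [hmem]; simp only [List.any_eq_true]
    exact ⟨fun ⟨c, hc, h⟩ => ⟨c, hc, (pvCategory_eq_one c).1 h⟩,
           fun ⟨c, hc, h⟩ => ⟨c, hc, (pvCategory_eq_one c).2 h⟩⟩
  have h2 : ((2:Int) ∈ S) ↔ cs.any PySem.Chars.isdigit = true := by
    rw [hmem]; simp only [List.any_eq_true]
    exact ⟨fun ⟨c, hc, h⟩ => ⟨c, hc, (pvCategory_eq_two c).1 h⟩,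
           fun ⟨c, hc, h⟩ => ⟨c, hc, (pvCategory_eq_two c).2 h⟩⟩
  have h3 : ((3:Int) ∈ S) ↔ cs.any (fun c => !PySem.Chars.isalnum c) = true := by
    rw [hmem]; simp only [List.any_eq_true]
    exact ⟨fun ⟨c, hc, h⟩ => ⟨c, hc, (pvCategory_eq_three c).1 h⟩,
           fun ⟨c, hc, h⟩ => ⟨c, hc, (pvCategory_eq_three c).2 h⟩⟩
  rw [hlen, hcard]
  by_cases b0 : (0:Int) ∈ S <;> by_cases b1 : (1:Int) ∈ S <;>
    by_cases b2 : (2:Int) ∈ S <;> by_cases b3 : (3:Int) ∈ S <;>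
    simp [b0, b1, b2, b3, ← h0, ← h1, ← h2, ← h3]

-- RUN COUNT: the fold over a sorted list counts the distinct elements
theorem pv_runcount_some (l : List Char) (hl : l.Pairwise (· ≤ ·)) :
    ∀ (p : Char) (k : Int), (∀ x ∈ l, p ≤ x) →
    (l.foldl (fun (st : Int × Option Char) c => if some c ≠ st.2 then (st.1 + 1, some c) else st)
      (k, some p)).1 = k + (l.toFinset.erase p).card := by
  induction l with
  | nil => intro p k _; simp
  | cons c cs ih =>
    intro p k hpl
    rcases List.pairwise_cons.1 hl with ⟨hc, hcs⟩
    have hpc : p ≤ c := hpl c (List.mem_cons_self ..)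
    by_cases hcp : c = p
    · subst hcp
      rw [List.foldl_cons, if_neg (show ¬ (some c ≠ (k, some c).2) from fun hne => hne rfl)]
      rw [ih hcs c k (fun x hx => le_trans (le_refl c) (hc x hx))]
      congr 1
      rw [List.toFinset_cons, Finset.erase_insert_eq_erase]
    · rw [List.foldl_cons,
          if_pos (show (some c ≠ (k, some p).2) from fun h => hcp (Option.some.inj h))]
      rw [ih hcs c (k + 1) hc]
      have hplt : p < c := lt_of_le_of_ne hpc (fun h => hcp h.symm)
      have hpn : p ∉ (c :: cs).toFinset := by
        simp only [List.toFinset_cons, Finset.mem_insert, List.mem_toFinset]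
        rintro (rfl | hmem)
        · exact absurd rfl (ne_of_lt hplt)
        · exact absurd (lt_of_lt_of_le hplt (hc p hmem)) (lt_irrefl p)
      rw [Finset.erase_eq_self.2 hpn, List.toFinset_cons]
      by_cases hcm : c ∈ cs.toFinset
      · have h1 : insert c cs.toFinset = cs.toFinset := Finset.insert_eq_of_mem hcm
        have h2 : (cs.toFinset.erase c).card = cs.toFinset.card - 1 := Finset.card_erase_of_mem hcm
        have h3 : 1 ≤ cs.toFinset.card := Finset.card_pos.2 ⟨c, hcm⟩
        rw [h1, h2]
        omega
      · rw [Finset.card_insert_of_notMem hcm, Finset.erase_eq_self.2 hcm]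
        push_cast
        ring

theorem pv_runcount_none (l : List Char) (hl : l.Pairwise (· ≤ ·)) :
    (l.foldl (fun (st : Int × Option Char) c => if some c ≠ st.2 then (st.1 + 1, some c) else st)
      ((0 : Int), (none : Option Char))).1 = l.toFinset.card := by
  cases l with
  | nil => simp
  | cons c cs =>
    rcases List.pairwise_cons.1 hl with ⟨hc, hcs⟩
    rw [List.foldl_cons,
        if_pos (show (some c ≠ (((0:Int), (none : Option Char))).2) from by simp)]
    rw [pv_runcount_some cs hcs c (0 + 1) hc, List.toFinset_cons]
    by_cases hcm : c ∈ cs.toFinset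
    · have h1 : insert c cs.toFinset = cs.toFinset := Finset.insert_eq_of_mem hcm
      have h2 : (cs.toFinset.erase c).card = cs.toFinset.card - 1 := Finset.card_erase_of_mem hcm
      have h3 : 1 ≤ cs.toFinset.card := Finset.card_pos.2 ⟨c, hcm⟩
      rw [h1, h2]
      omega
    · rw [Finset.card_insert_of_notMem hcm, Finset.erase_eq_self.2 hcm]
      push_cast
      ring

-- UNIQUE: both distinct-character counts equal the card of the character set
theorem pv_unique (cs : List Char) :
    ((PySem.List.sorted cs (fun c => c) false).foldl
      (fun (st : Int × Option Char) c => if some c ≠ st.2 then (st.1 + 1, some c) else st)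
      ((0 : Int), (none : Option Char))).1
    = (PySem.Set.len (PySem.Set.ofList cs) : Int) := by
  have hperm : (PySem.List.sorted cs (fun c => c) false).Perm cs := PySem.List.sorted_perm ..
  rw [pv_runcount_none _ (PySem.List.sorted_pairwise (xs := cs) (key := fun c => c)),
      List.toFinset_eq_of_perm _ _ hperm, pv_setlen_eq_card]

-- ===== VERDICT (by name: the statement is the Claim_ definition above) =====
theorem assess_secret_strength_py_spec : Claim_equal_assess_secret_strength_py := by
  intro secret _
  unfold Spec_assess_secret_strength_py assess_secret_strength_py assess_secret_strength_py_alt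
  simp only [pv_unique, pv_variety]
  ring_nf
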